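-- pv_equiv track=rewrite | github.com/anirudhprabhakaran3/sodc-assignment | boolalg/rules/rules.py | identity_or
-- ===== SOURCE A (Python) =====
-- def identity_or(s):
--     """
--         Input: List of cubes
--         Output: List of cubes after applying a+A = 1
--     """
--     single_cube_list = []
--     for cube in s:
--         if len(cube) == 1:
--             if cube == "0" or cube == "1":
--                 continue
--             single_cube_list.append(cube)
--             x = cube.lower()
--             X = cube.upper()
--             if x in single_cube_list and X in single_cube_list:
--                 return ["1"]
--
--     return s
-- ===== SOURCE B (Python) =====
-- def identity_or(s):
--     # Two-pass: build the set of usable single-char cubes, then scan for a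
--     # complementary (or caseless) pair.
--     chars = {c for c in s if len(c) == 1 and c not in ("0", "1")}
--     if any(c.lower() in chars and c.upper() in chars for c in chars):
--         return ["1"]
--     return s
-- ===== Notes on version B (the rewrite author's own statement) =====
-- stated objective: simpler
-- what changed: A's single interleaved loop that appends each usable single-char cube to a list and immediately re-scans that list for the lower/upper pair is replaced by a two-pass decomposition: first build a set of all usable single-char cubes, then test with any() whether some member has both its lowercase and uppercase form in the set.
import Mathlib
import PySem

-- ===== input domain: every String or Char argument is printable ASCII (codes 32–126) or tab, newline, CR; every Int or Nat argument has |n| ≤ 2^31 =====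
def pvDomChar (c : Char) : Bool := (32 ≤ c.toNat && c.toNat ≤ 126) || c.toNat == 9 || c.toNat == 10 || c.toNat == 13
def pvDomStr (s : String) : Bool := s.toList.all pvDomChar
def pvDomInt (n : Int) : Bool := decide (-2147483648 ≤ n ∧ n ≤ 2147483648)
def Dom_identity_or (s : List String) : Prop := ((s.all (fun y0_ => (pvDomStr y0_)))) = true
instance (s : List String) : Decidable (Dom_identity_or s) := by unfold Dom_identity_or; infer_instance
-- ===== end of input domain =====

-- B replaces A's single append-then-rescan loop by a build-the-set-then-scan
-- two-pass decomposition (objective: simpler).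

-- ===== PORT A =====
-- A's loop: walks the cubes maintaining single_cube_list (acc); returns true the
-- moment the just-appended cube's lower and upper forms are both in the list.
def identity_or_go : List String → List String → Bool
  | [], _ => false
  | cube :: rest, acc =>
    if PySem.Str.len cube == 1 then
      if cube == "0" || cube == "1" then identity_or_go rest acc
      else
        let acc' := acc ++ [cube]
        let x := PySem.Str.lower cube
        let X := PySem.Str.upper cube
        if acc'.contains x && acc'.contains X then true
        else identity_or_go rest acc'
    else identity_or_go rest acc

def identity_or (s : List String) : List String :=
  if identity_or_go s [] then ["1"] else s

-- ===== PORT B =====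
def identity_or_alt (s : List String) : List String :=
  let chars : PySem.Set String :=
    PySem.Set.ofList (s.filter (fun c => PySem.Str.len c == 1 && !(c == "0" || c == "1")))
  if chars.any (fun c =>
      PySem.Set.contains chars (PySem.Str.lower c) && PySem.Set.contains chars (PySem.Str.upper c))
  then ["1"] else s

-- ===== PRECONDITION & SPEC =====
def Spec_identity_or (s : List String) (out : List String) : Prop := out = identity_or_alt s
instance (s : List String) (out : List String) : Decidable (Spec_identity_or s out) := by unfold Spec_identity_or; infer_instance

-- ===== CLAIM (what is proved, stated in full; the proofs are below) =====
def Claim_equal_identity_or : Prop := ∀ (s : List String), Dom_identity_or s → Spec_identity_or s (identity_or s)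

-- ===== LEMMAS AND PROOFS =====

theorem pvToN (n : Nat) (h : n < 55296) : (Char.ofNat n).toNat = n := by
  unfold Char.ofNat; rw [dif_pos (Or.inl h)]; rfl

theorem pvChEq {a b : Char} (h : a.toNat = b.toNat) : a = b :=
  Char.ext (UInt32.toNat_inj.mp h)

theorem pvHle (a b : Char) : (a ≤ b) ↔ (a.toNat ≤ b.toNat) :=
  Char.le_def.trans UInt32.le_iff_toNat_le

theorem pvIsupper_iff (c : Char) : PySem.Chars.isupper c = true ↔ (65 ≤ c.toNat ∧ c.toNat ≤ 90) := by
  simp [PySem.Chars.isupper, pvHle]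

theorem pvIslower_iff (c : Char) : PySem.Chars.islower c = true ↔ (97 ≤ c.toNat ∧ c.toNat ≤ 122) := by
  simp [PySem.Chars.islower, pvHle]

theorem pvUL (c : Char) : PySem.Chars.upperChar (PySem.Chars.lowerChar c) = PySem.Chars.upperChar c := by
  simp only [PySem.Chars.upperChar, PySem.Chars.lowerChar]
  by_cases hA : 65 ≤ c.toNat ∧ c.toNat ≤ 90
  · rw [if_pos ((pvIsupper_iff c).mpr hA)]
    have hv : (Char.ofNat (c.toNat + 32)).toNat = c.toNat + 32 := pvToN _ (by omega)
    rw [if_pos ((pvIslower_iff _).mpr (by rw [hv]; omega)),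
        if_neg (fun h => by have := (pvIslower_iff c).mp h; omega)]
    exact pvChEq (by rw [pvToN _ (by rw [hv]; omega), hv]; omega)
  · rw [if_neg (fun h => hA ((pvIsupper_iff c).mp h))]

theorem pvLL (c : Char) : PySem.Chars.lowerChar (PySem.Chars.lowerChar c) = PySem.Chars.lowerChar c := by
  simp only [PySem.Chars.lowerChar]
  by_cases hA : 65 ≤ c.toNat ∧ c.toNat ≤ 90
  · rw [if_pos ((pvIsupper_iff c).mpr hA)]
    have hv : (Char.ofNat (c.toNat + 32)).toNat = c.toNat + 32 := pvToN _ (by omega)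
    rw [if_neg (fun h => by have := (pvIsupper_iff _).mp h; rw [hv] at this; omega)]
  · rw [if_neg (fun h => hA ((pvIsupper_iff c).mp h)),
        if_neg (fun h => hA ((pvIsupper_iff c).mp h))]

theorem pvLU (c : Char) : PySem.Chars.lowerChar (PySem.Chars.upperChar c) = PySem.Chars.lowerChar c := by
  simp only [PySem.Chars.upperChar, PySem.Chars.lowerChar]
  by_cases ha : 97 ≤ c.toNat ∧ c.toNat ≤ 122
  · rw [if_pos ((pvIslower_iff c).mpr ha)]
    have hv : (Char.ofNat (c.toNat - 32)).toNat = c.toNat - 32 := pvToN _ (by omega)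
    rw [if_pos ((pvIsupper_iff _).mpr (by rw [hv]; omega)),
        if_neg (fun h => by have := (pvIsupper_iff c).mp h; omega)]
    exact pvChEq (by rw [pvToN _ (by rw [hv]; omega), hv]; omega)
  · rw [if_neg (fun h => ha ((pvIslower_iff c).mp h))]

theorem pvUU (c : Char) : PySem.Chars.upperChar (PySem.Chars.upperChar c) = PySem.Chars.upperChar c := by
  simp only [PySem.Chars.upperChar]
  by_cases ha : 97 ≤ c.toNat ∧ c.toNat ≤ 122
  · rw [if_pos ((pvIslower_iff c).mpr ha)]
    have hv : (Char.ofNat (c.toNat - 32)).toNat = c.toNat - 32 := pvToN _ (by omega)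
    rw [if_neg (fun h => by have := (pvIslower_iff _).mp h; rw [hv] at this; omega)]
  · rw [if_neg (fun h => ha ((pvIslower_iff c).mp h)),
        if_neg (fun h => ha ((pvIslower_iff c).mp h))]

theorem pvStrEq {a b : String} (h : a.toList = b.toList) : a = b := by
  simpa using congrArg String.ofList h

theorem pvSUL (a : String) : PySem.Str.upper (PySem.Str.lower a) = PySem.Str.upper a := by
  apply pvStrEq
  simp [PySem.Str.toList_upper, PySem.Str.toList_lower, PySem.Chars.upper, PySem.Chars.lower,
        Function.comp, pvUL]

theorem pvSLL (a : String) : PySem.Str.lower (PySem.Str.lower a) = PySem.Str.lower a := by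
  apply pvStrEq
  simp [PySem.Str.toList_lower, PySem.Chars.lower, Function.comp, pvLL]

theorem pvSLU (a : String) : PySem.Str.lower (PySem.Str.upper a) = PySem.Str.lower a := by
  apply pvStrEq
  simp [PySem.Str.toList_upper, PySem.Str.toList_lower, PySem.Chars.upper, PySem.Chars.lower,
        Function.comp, pvLU]

theorem pvSUU (a : String) : PySem.Str.upper (PySem.Str.upper a) = PySem.Str.upper a := by
  apply pvStrEq
  simp [PySem.Str.toList_upper, PySem.Chars.upper, Function.comp, pvUU]

-- the filter predicate both characterisations share
def pvP (c : String) : Bool := PySem.Str.len c == 1 && !(c == "0" || c == "1")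

-- A's loop returns true iff some kept cube has both its lower and upper form
-- among acc ++ kept cubes.
theorem pvGo_iff (l acc : List String) :
    identity_or_go l acc = true ↔
      ∃ c ∈ l.filter pvP,
        (PySem.Str.lower c) ∈ acc ++ l.filter pvP ∧ (PySem.Str.upper c) ∈ acc ++ l.filter pvP := by
  induction l generalizing acc with
  | nil => simp [identity_or_go]
  | cons cube rest ih =>
    by_cases h1 : (PySem.Str.len cube == 1) = true
    · by_cases h01 : (cube == "0" || cube == "1") = true
      · have hP : pvP cube = false := by unfold pvP; rw [h01]; simp
        simp only [identity_or_go, if_pos h1, if_pos h01]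
        rw [ih, List.filter_cons_of_neg (by simp [hP])]
      · have h01f : (cube == "0" || cube == "1") = false := by
          cases hb : (cube == "0" || cube == "1")
          · rfl
          · exact absurd hb h01
        have hP : pvP cube = true := by unfold pvP; rw [h1, h01f]; rfl
        rw [List.filter_cons_of_pos hP]
        have hlist : acc ++ (cube :: List.filter pvP rest)
            = (acc ++ [cube]) ++ List.filter pvP rest := by simp
        rw [hlist]
        simp only [identity_or_go, if_pos h1, if_neg h01]
        by_cases hchk : ((acc ++ [cube]).contains (PySem.Str.lower cube)
            && (acc ++ [cube]).contains (PySem.Str.upper cube)) = true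
        · rw [if_pos hchk]
          simp only [Bool.and_eq_true, List.contains_eq_mem, decide_eq_true_eq] at hchk
          constructor
          · intro _
            exact ⟨cube, by simp, List.mem_append.mpr (Or.inl hchk.1),
              List.mem_append.mpr (Or.inl hchk.2)⟩
          · intro _; rfl
        · rw [if_neg hchk, ih]
          constructor
          · rintro ⟨c, hc, hlo, hup⟩
            exact ⟨c, List.mem_cons_of_mem _ hc, hlo, hup⟩
          · rintro ⟨c, hc, hlo, hup⟩
            rcases List.mem_cons.mp hc with hceq | hcr
            · subst hceq
              simp only [Bool.and_eq_true, List.contains_eq_mem, decide_eq_true_eq,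
                not_and_or] at hchk
              rcases hchk with hn | hn
              · have hmem : PySem.Str.lower c ∈ List.filter pvP rest := by
                  rcases List.mem_append.mp hlo with h | h
                  · exact absurd h (by simpa using hn)
                  · exact h
                exact ⟨_, hmem, by rw [pvSLL]; exact hlo, by rw [pvSUL]; exact hup⟩
              · have hmem : PySem.Str.upper c ∈ List.filter pvP rest := by
                  rcases List.mem_append.mp hup with h | h
                  · exact absurd h (by simpa using hn)
                  · exact h
                exact ⟨_, hmem, by rw [pvSLU]; exact hlo, by rw [pvSUU]; exact hup⟩
            · exact ⟨c, hcr, hlo, hup⟩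
    · have h1f : (PySem.Str.len cube == 1) = false := by
        cases hb : (PySem.Str.len cube == 1)
        · rfl
        · exact absurd hb h1
      have hP : pvP cube = false := by unfold pvP; rw [h1f]; rfl
      simp only [identity_or_go, if_neg h1]
      rw [ih, List.filter_cons_of_neg (by simp [hP])]

-- B's any over the set tests the same existence.
theorem pvAlt_iff (s : List String) :
    ((PySem.Set.ofList (s.filter (fun c => PySem.Str.len c == 1 && !(c == "0" || c == "1")))).any
      (fun c =>
        PySem.Set.contains (PySem.Set.ofList (s.filter (fun c => PySem.Str.len c == 1 && !(c == "0" || c == "1")))) (PySem.Str.lower c)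
        && PySem.Set.contains (PySem.Set.ofList (s.filter (fun c => PySem.Str.len c == 1 && !(c == "0" || c == "1")))) (PySem.Str.upper c))) = true ↔
      ∃ c ∈ s.filter pvP,
        (PySem.Str.lower c) ∈ s.filter pvP ∧ (PySem.Str.upper c) ∈ s.filter pvP := by
  have hP : (fun c => PySem.Str.len c == 1 && !(c == "0" || c == "1")) = pvP := by
    funext c; rfl
  simp only [hP, List.any_eq_true, PySem.Set.contains, Bool.and_eq_true, List.contains_eq_mem,
    decide_eq_true_eq]
  constructor
  · rintro ⟨c, hc, hlo, hup⟩
    exact ⟨c, (PySem.Set.mem_ofList _ _).mp hc,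
      (PySem.Set.mem_ofList _ _).mp hlo, (PySem.Set.mem_ofList _ _).mp hup⟩
  · rintro ⟨c, hc, hlo, hup⟩
    exact ⟨c, (PySem.Set.mem_ofList _ _).mpr hc,
      (PySem.Set.mem_ofList _ _).mpr hlo, (PySem.Set.mem_ofList _ _).mpr hup⟩

-- ===== VERDICT (by name: the statement is the Claim_ definition above) =====
theorem identity_or_spec : Claim_equal_identity_or := by
  intro s _
  unfold Spec_identity_or identity_or identity_or_alt
  by_cases h : identity_or_go s [] = true
  · rw [if_pos h]
    rw [pvGo_iff] at h
    simp only [List.nil_append] at h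
    rw [if_pos ((pvAlt_iff s).mpr h)]
  · rw [if_neg h]
    rw [pvGo_iff] at h
    simp only [List.nil_append] at h
    rw [if_neg (fun hh => h ((pvAlt_iff s).mp hh))]
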